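-- pv_equiv track=rewrite | github.com/F3AST123/F3AST | util/eval.py | get_labels_start_end_time
-- ===== SOURCE A (Python) =====
-- def get_labels_start_end_time(frame_wise_labels, bg_class=[0]):
--     labels = []
--     starts = []
--     ends = []
--     if len(frame_wise_labels) <= 0:
--         return labels, starts, ends
--     last_label = frame_wise_labels[0]
--     if frame_wise_labels[0] not in bg_class:
--         labels.append(frame_wise_labels[0])
--         starts.append(0)
--     for i in range(len(frame_wise_labels)):
--         if frame_wise_labels[i] != last_label:
--             if frame_wise_labels[i] not in bg_class:
--                 labels.append(frame_wise_labels[i])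
--                 starts.append(i)
--             if last_label not in bg_class:
--                 ends.append(i)
--             last_label = frame_wise_labels[i]
--     if last_label not in bg_class:
--         ends.append(i)
--     return labels, starts, ends
-- ===== SOURCE B (Python) =====
-- def get_labels_start_end_time(frame_wise_labels, bg_class=[0]):
--     # Two-pass: collect run descriptors (label, start index), then emit
--     # label/start/end per non-background run; last run ends at n-1 (inclusive),
--     # earlier runs end at the next run's start, as in the original.
--     n = len(frame_wise_labels)
--     labels, starts, ends = [], [], []
--     if n <= 0:
--         return labels, starts, ends
--     prev = frame_wise_labels[0]
--     runs = [(prev, 0)]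
--     for i, x in enumerate(frame_wise_labels[1:], 1):
--         if x != prev:
--             runs.append((x, i))
--         prev = x
--     next_starts = [s for (_, s) in runs[1:]] + [n - 1]
--     for (lab, st), en in zip(runs, next_starts):
--         if lab not in bg_class:
--             labels.append(lab)
--             starts.append(st)
--             ends.append(en)
--     return labels, starts, ends
-- ===== Notes on version B (the rewrite author's own statement) =====
-- stated objective: alternative
-- what changed: Replaced A's single stateful scan (interleaved appends guarded by a carried last_label) with a two-pass decomposition: first collect run descriptors (label, start index) via one enumerate pass, then emit labels/starts/ends for non-background runs, each run's end being the next run's start (or len-1 for the final run).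
import Mathlib
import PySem

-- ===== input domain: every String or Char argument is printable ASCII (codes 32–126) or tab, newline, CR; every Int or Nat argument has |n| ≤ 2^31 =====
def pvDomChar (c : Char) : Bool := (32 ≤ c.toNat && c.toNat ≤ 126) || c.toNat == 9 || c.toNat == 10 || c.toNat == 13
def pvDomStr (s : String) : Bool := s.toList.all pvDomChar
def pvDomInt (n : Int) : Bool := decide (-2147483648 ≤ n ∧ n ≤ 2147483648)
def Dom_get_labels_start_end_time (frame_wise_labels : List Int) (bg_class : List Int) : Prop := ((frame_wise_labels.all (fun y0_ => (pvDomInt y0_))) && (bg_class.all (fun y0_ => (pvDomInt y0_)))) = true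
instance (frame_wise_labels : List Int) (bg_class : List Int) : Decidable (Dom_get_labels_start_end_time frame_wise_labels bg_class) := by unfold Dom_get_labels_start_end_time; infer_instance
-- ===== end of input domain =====

-- B replaces A's single stateful scan by a two-pass decomposition (collect run
-- descriptors, then emit non-background runs); objective: alternative, same cost.


-- ===== PORT A =====
-- A's for-loop over range(len) as the obvious structural recursion over the list
-- with the index carried; after the loop Python's `i` equals len-1 (the loop
-- always runs since len > 0), transcribed as (length : Int) - 1.
def aLoop (bg : List Int) (xs : List Int) (i : Int) (labels starts ends : List Int)
    (last : Int) : List Int × List Int × List Int × Int :=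
  match xs with
  | [] => (labels, starts, ends, last)
  | x :: rest =>
    if x ≠ last then
      aLoop bg rest (i + 1)
        (if x ∈ bg then labels else labels ++ [x])
        (if x ∈ bg then starts else starts ++ [i])
        (if last ∈ bg then ends else ends ++ [i])
        x
    else
      aLoop bg rest (i + 1) labels starts ends last

def get_labels_start_end_time (frame_wise_labels : List Int) (bg_class : List Int) : List Int × List Int × List Int :=
  match frame_wise_labels with
  | [] => ([], [], [])
  | f :: _ =>
    let labels0 := if f ∈ bg_class then [] else [f]
    let starts0 := if f ∈ bg_class then [] else [(0 : Int)]
    let r := aLoop bg_class frame_wise_labels 0 labels0 starts0 [] f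
    (r.1, r.2.1,
      if r.2.2.2 ∈ bg_class then r.2.2.1 else r.2.2.1 ++ [(frame_wise_labels.length : Int) - 1])

-- ===== PORT B =====
-- pass 1 of Source B: run descriptors (label, start index)
def bRuns (xs : List Int) (prev : Int) (i : Int) (acc : List (Int × Int)) : List (Int × Int) :=
  match xs with
  | [] => acc
  | x :: rest => bRuns rest x (i + 1) (if x ≠ prev then acc ++ [(x, i)] else acc)

def get_labels_start_end_time_alt (frame_wise_labels : List Int) (bg_class : List Int) : List Int × List Int × List Int :=
  match frame_wise_labels with
  | [] => ([], [], [])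
  | f :: rest =>
    let n : Int := (frame_wise_labels.length : Int)
    let runs := bRuns rest f 1 [(f, 0)]
    let next_starts := runs.tail.map Prod.snd ++ [n - 1]
    (runs.zip next_starts).foldl
      (fun (st : List Int × List Int × List Int) p =>
        if p.1.1 ∈ bg_class then st
        else (st.1 ++ [p.1.1], st.2.1 ++ [p.1.2], st.2.2 ++ [p.2]))
      ([], [], [])

-- ===== PRECONDITION & SPEC =====
def Spec_get_labels_start_end_time (frame_wise_labels : List Int) (bg_class : List Int) (out : List Int × List Int × List Int) : Prop := out = get_labels_start_end_time_alt frame_wise_labels bg_class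
instance (frame_wise_labels : List Int) (bg_class : List Int) (out : List Int × List Int × List Int) : Decidable (Spec_get_labels_start_end_time frame_wise_labels bg_class out) := by unfold Spec_get_labels_start_end_time; infer_instance

-- ===== CLAIM (what is proved, stated in full; the proofs are below) =====
def Claim_equal_get_labels_start_end_time : Prop := ∀ (frame_wise_labels : List Int) (bg_class : List Int), Dom_get_labels_start_end_time frame_wise_labels bg_class → Spec_get_labels_start_end_time frame_wise_labels bg_class (get_labels_start_end_time frame_wise_labels bg_class)

-- ===== LEMMAS AND PROOFS =====

-- canonical run list (no accumulator)
def rAux (prev : Int) (i : Int) : List Int → List (Int × Int)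
  | [] => []
  | x :: rest => (if x ≠ prev then [(x, i)] else []) ++ rAux x (i + 1) rest

-- canonical ends-during-loop list
def eAux (bg : List Int) (prev : Int) (i : Int) : List Int → List Int
  | [] => []
  | x :: rest => (if x ≠ prev ∧ prev ∉ bg then [i] else []) ++ eAux bg x (i + 1) rest

-- runs zipped with next-starts (proof-side view of B's second pass input)
def Z (lab s i : Int) (xs : List Int) (z : Int) : List ((Int × Int) × Int) :=
  ((lab, s) :: rAux lab i xs).zip ((rAux lab i xs).map Prod.snd ++ [z])

theorem getLastD_cons' : ∀ (rest : List Int) (x last : Int),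
    (x :: rest).getLast?.getD last = rest.getLast?.getD x := by
  intro rest
  induction rest with
  | nil => intro x last; rfl
  | cons y t ih =>
      intro x last
      rw [List.getLast?_cons_cons, ih y last, ih y x]

theorem bRuns_eq : ∀ (xs : List Int) (prev i : Int) (acc : List (Int × Int)),
    bRuns xs prev i acc = acc ++ rAux prev i xs := by
  intro xs
  induction xs with
  | nil => intro prev i acc; simp [bRuns, rAux]
  | cons x rest ih =>
      intro prev i acc
      simp only [bRuns, rAux, ih]
      by_cases h : x ≠ prev <;> simp [h]

theorem aLoop_eq (bg : List Int) : ∀ (xs : List Int) (i last : Int) (L S E : List Int),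
    aLoop bg xs i L S E last =
      (L ++ (rAux last i xs).filterMap (fun p => if p.1 ∈ bg then none else some p.1),
       S ++ (rAux last i xs).filterMap (fun p => if p.1 ∈ bg then none else some p.2),
       E ++ eAux bg last i xs,
       xs.getLastD last) := by
  intro xs
  induction xs with
  | nil => intro i last L S E; simp [aLoop, rAux, eAux]
  | cons x rest ih =>
      intro i last L S E
      by_cases h : x ≠ last
      · by_cases hx : x ∈ bg <;> by_cases hl : last ∈ bg <;>
          simp [aLoop, rAux, eAux, h, hx, hl, ih, getLastD_cons']
      · simp at h
        subst h
        simp [aLoop, rAux, eAux, ih, getLastD_cons']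

-- pass 2 of B with a general accumulator
theorem bFold_eq (bg : List Int) : ∀ (l : List ((Int × Int) × Int)) (L S E : List Int),
    l.foldl (fun (st : List Int × List Int × List Int) p =>
        if p.1.1 ∈ bg then st
        else (st.1 ++ [p.1.1], st.2.1 ++ [p.1.2], st.2.2 ++ [p.2])) (L, S, E) =
      (L ++ l.filterMap (fun p => if p.1.1 ∈ bg then none else some p.1.1),
       S ++ l.filterMap (fun p => if p.1.1 ∈ bg then none else some p.1.2),
       E ++ l.filterMap (fun p => if p.1.1 ∈ bg then none else some p.2)) := by
  intro l
  induction l with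
  | nil => intro L S E; simp
  | cons p rest ih =>
      intro L S E
      by_cases h : p.1.1 ∈ bg <;> simp [h, ih]

theorem Z_cons_ne (lab s i z x : Int) (rest : List Int) (h : x ≠ lab) :
    Z lab s i (x :: rest) z = ((lab, s), i) :: Z x i (i + 1) rest z := by
  simp [Z, rAux, h]

theorem Z_cons_eq (lab s i z : Int) (rest : List Int) :
    Z lab s i (lab :: rest) z = Z lab s (i + 1) rest z := by
  simp [Z, rAux]

theorem Z_labels (bg : List Int) : ∀ (xs : List Int) (lab s i z : Int),
    (Z lab s i xs z).filterMap (fun p => if p.1.1 ∈ bg then none else some p.1.1) =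
      (if lab ∈ bg then [] else [lab]) ++
        (rAux lab i xs).filterMap (fun p => if p.1 ∈ bg then none else some p.1) := by
  intro xs
  induction xs with
  | nil =>
      intro lab s i z
      by_cases h : lab ∈ bg <;> simp [Z, rAux, h]
  | cons x rest ih =>
      intro lab s i z
      by_cases h : x ≠ lab
      · rw [Z_cons_ne lab s i z x rest h]
        by_cases hl : lab ∈ bg <;> by_cases hx : x ∈ bg <;>
          simp [rAux, h, hl, hx, ih x i (i + 1) z]
      · simp only [ne_eq, not_not] at h
        subst h
        rw [Z_cons_eq]
        by_cases hx : x ∈ bg <;> simp [rAux, hx, ih x s (i + 1) z]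

theorem Z_starts (bg : List Int) : ∀ (xs : List Int) (lab s i z : Int),
    (Z lab s i xs z).filterMap (fun p => if p.1.1 ∈ bg then none else some p.1.2) =
      (if lab ∈ bg then [] else [s]) ++
        (rAux lab i xs).filterMap (fun p => if p.1 ∈ bg then none else some p.2) := by
  intro xs
  induction xs with
  | nil =>
      intro lab s i z
      by_cases h : lab ∈ bg <;> simp [Z, rAux, h]
  | cons x rest ih =>
      intro lab s i z
      by_cases h : x ≠ lab
      · rw [Z_cons_ne lab s i z x rest h]
        by_cases hl : lab ∈ bg <;> by_cases hx : x ∈ bg <;>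
          simp [rAux, h, hl, hx, ih x i (i + 1) z]
      · simp only [ne_eq, not_not] at h
        subst h
        rw [Z_cons_eq]
        by_cases hx : x ∈ bg <;> simp [rAux, hx, ih x s (i + 1) z]

theorem Z_ends (bg : List Int) : ∀ (xs : List Int) (lab s i z : Int),
    (Z lab s i xs z).filterMap (fun p => if p.1.1 ∈ bg then none else some p.2) =
      eAux bg lab i xs ++ (if xs.getLastD lab ∈ bg then [] else [z]) := by
  intro xs
  induction xs with
  | nil =>
      intro lab s i z
      by_cases h : lab ∈ bg <;> simp [Z, rAux, eAux, h]
  | cons x rest ih =>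
      intro lab s i z
      by_cases h : x ≠ lab
      · rw [Z_cons_ne lab s i z x rest h]
        by_cases hl : lab ∈ bg <;>
          simp [eAux, h, hl, ih x i (i + 1) z, getLastD_cons']
      · simp only [ne_eq, not_not] at h
        subst h
        rw [Z_cons_eq]
        simp [eAux, ih x s (i + 1) z, getLastD_cons']

theorem aLoop_head (bg : List Int) (f : Int) (rest : List Int) (L S E : List Int) :
    aLoop bg (f :: rest) 0 L S E f = aLoop bg rest 1 L S E f := by
  simp [aLoop]

-- ===== VERDICT (by name: the statement is the Claim_ definition above) =====
theorem get_labels_start_end_time_spec : Claim_equal_get_labels_start_end_time := by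
  unfold Claim_equal_get_labels_start_end_time
  intro fwl bg _
  unfold Spec_get_labels_start_end_time
  cases fwl with
  | nil => rfl
  | cons f rest =>
    simp only [get_labels_start_end_time, get_labels_start_end_time_alt,
      bRuns_eq, List.singleton_append, aLoop_head bg, aLoop_eq bg]
    rw [show ((f, (0:Int)) :: rAux f 1 rest).tail = rAux f 1 rest from rfl]
    rw [show ((f, (0:Int)) :: rAux f 1 rest).zip ((rAux f 1 rest).map Prod.snd ++ [((f :: rest).length : Int) - 1]) = Z f 0 1 rest (((f :: rest).length : Int) - 1) from rfl]
    rw [bFold_eq bg, Z_labels bg, Z_starts bg, Z_ends bg]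
    by_cases hl : rest.getLast?.getD f ∈ bg <;> simp [hl]
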